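-- pv_equiv track=rewrite | github.com/Raaptex/pypp | pypp.py | __remove_indent
-- ===== SOURCE A (Python) =====
-- def __remove_indent(instruction):
--     removed = ""
--     text = False
--     for l in instruction:
--         if l != " ":
--             removed += l
--             text = True
--         elif text:
--             removed += l
--     return removed
-- ===== SOURCE B (Python) =====
-- def __remove_indent(instruction):
--     i = 0
--     while i < len(instruction) and instruction[i] == ' ':
--         i += 1
--     return instruction[i:]
-- ===== Notes on version B (the rewrite author's own statement) =====
-- stated objective: faster
-- what changed: Instead of building the output character by character with a boolean flag via repeated string concatenation, B scans forward to the first non-space index and returns a single slice.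
import Mathlib
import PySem

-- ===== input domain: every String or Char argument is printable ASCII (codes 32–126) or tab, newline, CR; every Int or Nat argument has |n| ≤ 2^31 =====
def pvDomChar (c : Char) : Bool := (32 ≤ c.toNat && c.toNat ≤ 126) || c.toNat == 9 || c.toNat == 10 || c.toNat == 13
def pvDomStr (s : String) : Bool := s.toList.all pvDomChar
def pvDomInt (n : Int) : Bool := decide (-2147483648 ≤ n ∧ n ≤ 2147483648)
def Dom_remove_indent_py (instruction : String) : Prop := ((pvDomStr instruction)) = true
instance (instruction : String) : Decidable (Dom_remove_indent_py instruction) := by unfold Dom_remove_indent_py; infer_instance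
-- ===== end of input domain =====

-- B strips the leading spaces by finding the first non-space index and slicing once,
-- instead of A's per-character accumulator build with a 'seen text' flag (objective: simpler).

-- ===== PORT A =====
-- A's loop body: state (removed, text), one character l
def pvStepA (st : List Char × Bool) (l : Char) : List Char × Bool :=
  if l ≠ ' ' then (st.1 ++ [l], true)
  else if st.2 then (st.1 ++ [l], st.2)
  else st

-- A: fold over the characters with state (removed, text)
def remove_indent_py (instruction : String) : String :=
  let r := instruction.toList.foldl pvStepA ([], false)
  String.mk r.1

-- ===== PORT B =====
-- B's while loop: advance past leading spaces, count how many
def pvCountLead : List Char → Nat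
  | [] => 0
  | c :: rest => if c = ' ' then 1 + pvCountLead rest else 0

-- then return instruction[i:] in one slice
def remove_indent_py_alt (instruction : String) : String :=
  String.mk (instruction.toList.drop (pvCountLead instruction.toList))

-- ===== PRECONDITION & SPEC =====
def Spec_remove_indent_py (instruction : String) (out : String) : Prop := out = remove_indent_py_alt instruction
instance (instruction : String) (out : String) : Decidable (Spec_remove_indent_py instruction out) := by unfold Spec_remove_indent_py; infer_instance

-- ===== CLAIM (what is proved, stated in full; the proofs are below) =====
def Claim_equal_remove_indent_py : Prop := ∀ (instruction : String), Dom_remove_indent_py instruction → Spec_remove_indent_py instruction (remove_indent_py instruction)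

-- ===== LEMMAS AND PROOFS =====

-- once text = true, A appends every remaining character
theorem pvFoldA_true (cs : List Char) (acc : List Char) :
    cs.foldl pvStepA (acc, true) = (acc ++ cs, true) := by
  induction cs generalizing acc with
  | nil => simp
  | cons c rest ih =>
    rw [List.foldl_cons]
    by_cases h : c = ' ' <;> simp only [pvStepA, h, if_true, if_false, ite_true, ite_false,
      ne_eq, not_true, not_false_iff, ite_not] <;> rw [ih] <;> simp

-- from text = false, A's result is acc followed by the suffix past the leading spaces
theorem pvFoldA_false (cs : List Char) (acc : List Char) :
    (cs.foldl pvStepA (acc, false)).1 = acc ++ cs.drop (pvCountLead cs) := by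
  induction cs generalizing acc with
  | nil => simp
  | cons c rest ih =>
    rw [List.foldl_cons]
    by_cases h : c = ' '
    · have hstep : pvStepA (acc, false) c = (acc, false) := by simp [pvStepA, h]
      rw [hstep, ih]
      simp [pvCountLead, h, Nat.add_comm]
    · have hstep : pvStepA (acc, false) c = (acc ++ [c], true) := by simp [pvStepA, h]
      rw [hstep, pvFoldA_true]
      simp [pvCountLead, h]

-- ===== VERDICT (by name: the statement is the Claim_ definition above) =====
theorem remove_indent_py_spec : Claim_equal_remove_indent_py := by
  intro instruction _
  unfold Spec_remove_indent_py remove_indent_py remove_indent_py_alt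
  show String.mk (List.foldl pvStepA ([], false) instruction.toList).1 = _
  rw [pvFoldA_false]
  simp
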